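-- pv_equiv track=rewrite | github.com/nisargthakkar/named-entity-recognition | src/ner_pytorch.py | merge_aida_yago_entities
-- ===== SOURCE A (Python) =====
-- def merge_aida_yago_entities(all_entity_links, batch_entities):
--     for entity in batch_entities.keys():
--         if entity not in all_entity_links:
--             all_entity_links[entity] = batch_entities[entity]
--         else:
--             for tag in batch_entities[entity].keys():
--                 if tag not in all_entity_links[entity]:
--                     all_entity_links[entity][tag] = batch_entities[entity][tag]
--                 else:
--                     for wikipedia_link in batch_entities[entity][tag].keys():
--                         if wikipedia_link not in all_entity_links[entity][tag]:
--                             all_entity_links[entity][tag][wikipedia_link] = batch_entities[entity][tag][wikipedia_link]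
--                         else:
--                             all_entity_links[entity][tag][wikipedia_link] += batch_entities[entity][tag][wikipedia_link]
--     return all_entity_links
-- ===== SOURCE B (Python) =====
-- def merge_aida_yago_entities(all_entity_links, batch_entities):
--     _merge(all_entity_links, batch_entities, 3)
--     return all_entity_links
--
--
-- def _merge(dst, src, level):
--     for key in src.keys():
--         if key not in dst:
--             dst[key] = src[key]
--         elif level > 1:
--             _merge(dst[key], src[key], level - 1)
--         else:
--             dst[key] += src[key]
-- ===== Notes on version B (the rewrite author's own statement) =====
-- stated objective: simpler
-- what changed: The three hand-unrolled nested dict-merging loops are replaced by one small generic recursive merge helper with a depth counter, called once at depth 3.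
import Mathlib
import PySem

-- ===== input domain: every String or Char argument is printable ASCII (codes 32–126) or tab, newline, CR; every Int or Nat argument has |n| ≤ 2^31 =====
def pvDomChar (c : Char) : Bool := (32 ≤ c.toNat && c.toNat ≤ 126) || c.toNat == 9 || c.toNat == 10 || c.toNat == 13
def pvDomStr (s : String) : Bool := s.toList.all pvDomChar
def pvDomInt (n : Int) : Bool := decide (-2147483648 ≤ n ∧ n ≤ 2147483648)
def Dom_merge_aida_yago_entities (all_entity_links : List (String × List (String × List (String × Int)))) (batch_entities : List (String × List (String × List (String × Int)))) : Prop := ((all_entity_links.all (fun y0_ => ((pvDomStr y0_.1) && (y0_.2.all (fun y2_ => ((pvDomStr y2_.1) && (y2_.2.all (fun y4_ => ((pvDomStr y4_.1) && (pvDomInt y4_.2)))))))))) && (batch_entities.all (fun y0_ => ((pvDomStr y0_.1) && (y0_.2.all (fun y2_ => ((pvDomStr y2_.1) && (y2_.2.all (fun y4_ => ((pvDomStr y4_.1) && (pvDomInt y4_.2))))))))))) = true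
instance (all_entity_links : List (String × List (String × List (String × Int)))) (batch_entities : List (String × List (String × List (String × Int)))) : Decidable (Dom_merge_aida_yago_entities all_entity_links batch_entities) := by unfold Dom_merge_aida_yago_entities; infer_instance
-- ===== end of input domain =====

-- B replaces A's three hand-unrolled nested merging loops by one generic recursive merge
-- helper with a depth counter (objective: simpler).  Both Pythons mutate all_entity_links in
-- place identically (and alias sub-dicts of batch_entities into it); the ports and the proof
-- are about the returned value.

-- ===== PORT A =====
-- Dict primitives on association lists (Python dict semantics):
-- dget k d = d.get(k) (first match), dset k v d = d[k] = v (overwrite keeps position, new keys append).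
def dget {V : Type} (k : String) : List (String × V) → Option V
  | [] => none
  | (k', v) :: t => if k' == k then some v else dget k t

-- d[k] where the key is known to be present (ported as lookup-with-default; exact there)
def dgetD {V : Type} (k : String) (d : List (String × V)) (dflt : V) : V := (dget k d).getD dflt

def dset {V : Type} (k : String) (v : V) : List (String × V) → List (String × V)
  | [] => [(k, v)]
  | (k', v') :: t => if k' == k then (k, v) :: t else (k', v') :: dset k v t

-- literal transliteration of A's three nested loops; 'x not in d' is ported as 'dget x d = none',
-- and each Python path expression all[e], all[e][t], batch[e], … is re-looked-up exactly where A does.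
def merge_aida_yago_entities (all_entity_links : List (String × List (String × List (String × Int)))) (batch_entities : List (String × List (String × List (String × Int)))) : List (String × List (String × List (String × Int))) :=
  (batch_entities.map Prod.fst).foldl (fun d entity =>
    match dget entity d with
    | none => dset entity (dgetD entity batch_entities []) d
    | some _ =>
      ((dgetD entity batch_entities []).map Prod.fst).foldl (fun d tag =>
        match dget tag (dgetD entity d []) with
        | none =>
          dset entity (dset tag (dgetD tag (dgetD entity batch_entities []) []) (dgetD entity d [])) d
        | some _ =>
          ((dgetD tag (dgetD entity batch_entities []) []).map Prod.fst).foldl (fun d link =>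
            match dget link (dgetD tag (dgetD entity d []) []) with
            | none =>
              dset entity (dset tag (dset link (dgetD link (dgetD tag (dgetD entity batch_entities []) []) 0) (dgetD tag (dgetD entity d []) [])) (dgetD entity d [])) d
            | some cur =>
              dset entity (dset tag (dset link (cur + dgetD link (dgetD tag (dgetD entity batch_entities []) []) 0) (dgetD tag (dgetD entity d []) [])) (dgetD entity d [])) d
          ) d
      ) d
  ) all_entity_links

-- ===== PORT B =====
-- B's recursive helper _merge(dst, src, level): the Python recursion is polymorphic in the value
-- type, so the port instantiates the generic one-level merge at each of the three depths.
def bmergeWith {V : Type} (comb : V → V → V) (dst src : List (String × V)) : List (String × V) :=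
  (src.map Prod.fst).foldl (fun d key =>
    match dget key src with
    | none => d          -- unreachable: key is drawn from src's own keys
    | some sv =>
      match dget key d with
      | none => dset key sv d
      | some dv => dset key (comb dv sv) d) dst

def merge_aida_yago_entities_alt (all_entity_links : List (String × List (String × List (String × Int)))) (batch_entities : List (String × List (String × List (String × Int)))) : List (String × List (String × List (String × Int))) :=
  bmergeWith (bmergeWith (bmergeWith (fun a b => a + b))) all_entity_links batch_entities

-- ===== PRECONDITION & SPEC =====
def Spec_merge_aida_yago_entities (all_entity_links : List (String × List (String × List (String × Int)))) (batch_entities : List (String × List (String × List (String × Int)))) (out : List (String × List (String × List (String × Int)))) : Prop := out = merge_aida_yago_entities_alt all_entity_links batch_entities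
instance (all_entity_links : List (String × List (String × List (String × Int)))) (batch_entities : List (String × List (String × List (String × Int)))) (out : List (String × List (String × List (String × Int)))) : Decidable (Spec_merge_aida_yago_entities all_entity_links batch_entities out) := by unfold Spec_merge_aida_yago_entities; infer_instance

-- ===== CLAIM (what is proved, stated in full; the proofs are below) =====
def Claim_equal_merge_aida_yago_entities : Prop := ∀ (all_entity_links : List (String × List (String × List (String × Int)))) (batch_entities : List (String × List (String × List (String × Int)))), Dom_merge_aida_yago_entities all_entity_links batch_entities → Spec_merge_aida_yago_entities all_entity_links batch_entities (merge_aida_yago_entities all_entity_links batch_entities)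

-- ===== LEMMAS AND PROOFS =====

theorem dget_dset_self {V : Type} (k : String) (v : V) (d : List (String × V)) :
    dget k (dset k v d) = some v := by
  induction d with
  | nil => simp [dget, dset]
  | cons p t ih =>
    obtain ⟨k', v'⟩ := p
    by_cases h : k' == k
    · simp [dset, h, dget]
    · simp [dset, h, dget, ih]

theorem dset_dset_self {V : Type} (k : String) (v w : V) (d : List (String × V)) :
    dset k w (dset k v d) = dset k w d := by
  induction d with
  | nil => simp [dset]
  | cons p t ih =>
    obtain ⟨k', v'⟩ := p
    by_cases h : k' == k
    · simp [dset, h]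
    · simp [dset, h, ih]

theorem dset_dget_self {V : Type} (k : String) (v : V) (d : List (String × V))
    (h : dget k d = some v) : dset k v d = d := by
  induction d with
  | nil => simp [dget] at h
  | cons p t ih =>
    obtain ⟨k', v'⟩ := p
    by_cases hk : k' == k
    · have hk' : k' = k := by simpa using hk
      have hv : v' = v := by simpa [dget, hk] using h
      simp [dset, hk', hv]
    · simp [dget, hk] at h
      simp [dset, hk, ih h]

theorem dget_some_of_mem {V : Type} (k : String) (d : List (String × V))
    (h : k ∈ d.map Prod.fst) : ∃ v, dget k d = some v := by
  induction d with
  | nil => simp at h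
  | cons p t ih =>
    by_cases hk : p.1 == k
    · exact ⟨p.2, by obtain ⟨k', v'⟩ := p; simp_all [dget]⟩
    · have hm : k ∈ t.map Prod.fst := by
        rcases (by simpa using h : k = p.1 ∨ ∃ x, (k, x) ∈ t) with h1 | ⟨x, hx⟩
        · exact absurd (by simp [h1]) hk
        · exact List.mem_map.mpr ⟨(k, x), hx, rfl⟩
      obtain ⟨v, hv⟩ := ih hm
      exact ⟨v, by obtain ⟨k', v'⟩ := p; simpa [dget, hk] using hv⟩

theorem dgetD_eq {V : Type} {k : String} {d : List (String × V)} {v : V} (dflt : V)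
    (h : dget k d = some v) : dgetD k d dflt = v := by simp [dgetD, h]

-- A loop over full state d that only updates the value at the fixed key k equals one update
-- with a fold over that value (turns A's path-updating loops into B's local merges).
theorem foldl_path {W α : Type} (k : String) (dflt : W) (F : W → α → W)
    (body : List (String × W) → α → List (String × W))
    (hb : ∀ d a, (dget k d).isSome → body d a = dset k (F (dgetD k d dflt) a) d) :
    ∀ (L : List α) (d : List (String × W)) (v : W), dget k d = some v →
      L.foldl body d = dset k (L.foldl F v) d := by
  intro L
  induction L with
  | nil => intro d v h; simpa using (dset_dget_self k v d h).symm
  | cons a L ih =>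
    intro d v h
    have h1 : body d a = dset k (F v a) d := by
      rw [hb d a (by simp [h]), dgetD_eq dflt h]
    rw [List.foldl_cons, h1, ih _ (F v a) (dget_dset_self k _ d), dset_dset_self,
      List.foldl_cons]

-- innermost level: A's count-accumulating loop = bmergeWith (+)
theorem level1 (bst s2 : List (String × Int)) :
    (bst.map Prod.fst).foldl (fun s2 link =>
        match dget link s2 with
        | none => dset link (dgetD link bst 0) s2
        | some cur => dset link (cur + dgetD link bst 0) s2) s2
    = bmergeWith (fun a b => a + b) s2 bst := by
  unfold bmergeWith
  apply PySem.List.foldl_congr_mem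
  intro acc x hx
  obtain ⟨v, hv⟩ := dget_some_of_mem x bst hx
  rw [dgetD_eq 0 hv] at *
  cases hc : dget x acc <;> simp [hv]

-- middle level: A's tag loop (with its inner link loop) = bmergeWith (bmergeWith (+))
theorem level2 (sv dv : List (String × List (String × Int))) :
    (sv.map Prod.fst).foldl (fun s tag =>
        match dget tag s with
        | none => dset tag (dgetD tag sv []) s
        | some _ =>
          ((dgetD tag sv []).map Prod.fst).foldl (fun s1 link =>
              match dget link (dgetD tag s1 []) with
              | none =>
                dset tag (dset link (dgetD link (dgetD tag sv []) 0) (dgetD tag s1 [])) s1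
              | some cur =>
                dset tag (dset link (cur + dgetD link (dgetD tag sv []) 0) (dgetD tag s1 [])) s1) s) dv
    = bmergeWith (bmergeWith (fun a b => a + b)) dv sv := by
  conv_rhs => rw [bmergeWith]
  apply PySem.List.foldl_congr_mem
  intro s tag htag
  obtain ⟨bst, hbst⟩ := dget_some_of_mem tag sv htag
  have hd : dgetD tag sv ([] : List (String × Int)) = bst := dgetD_eq _ hbst
  simp only [hd, hbst]
  cases hs : dget tag s with
  | none => simp
  | some s2 =>
    have hpath := foldl_path tag ([] : List (String × Int))
      (fun s2' link =>
        match dget link s2' with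
        | none => dset link (dgetD link bst 0) s2'
        | some cur => dset link (cur + dgetD link bst 0) s2')
      (fun s1 link =>
        match dget link (dgetD tag s1 []) with
        | none => dset tag (dset link (dgetD link bst 0) (dgetD tag s1 [])) s1
        | some cur => dset tag (dset link (cur + dgetD link bst 0) (dgetD tag s1 [])) s1)
      (by intro s1 a _; cases hc : dget a (dgetD tag s1 ([] : List (String × Int))) <;> simp [hc])
      (bst.map Prod.fst) s s2 hs
    rw [hpath, level1 bst s2]

-- ===== VERDICT (by name: the statement is the Claim_ definition above) =====
theorem merge_aida_yago_entities_spec : Claim_equal_merge_aida_yago_entities := by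
  intro all_entity_links batch_entities _
  unfold Spec_merge_aida_yago_entities merge_aida_yago_entities merge_aida_yago_entities_alt
  conv_rhs => rw [bmergeWith]
  apply PySem.List.foldl_congr_mem
  intro d e he
  obtain ⟨sv, hsv⟩ := dget_some_of_mem e batch_entities he
  have hd : dgetD e batch_entities ([] : List (String × List (String × Int))) = sv := dgetD_eq _ hsv
  simp only [hd, hsv]
  cases hc : dget e d with
  | none => simp
  | some dv =>
    have hpath := foldl_path e ([] : List (String × List (String × Int)))
      (fun s tag =>
        match dget tag s with
        | none => dset tag (dgetD tag sv []) s
        | some _ =>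
          ((dgetD tag sv []).map Prod.fst).foldl (fun s1 link =>
              match dget link (dgetD tag s1 []) with
              | none =>
                dset tag (dset link (dgetD link (dgetD tag sv []) 0) (dgetD tag s1 [])) s1
              | some cur =>
                dset tag (dset link (cur + dgetD link (dgetD tag sv []) 0) (dgetD tag s1 [])) s1) s)
      (fun d tag =>
        match dget tag (dgetD e d []) with
        | none =>
          dset e (dset tag (dgetD tag sv []) (dgetD e d [])) d
        | some _ =>
          ((dgetD tag sv []).map Prod.fst).foldl (fun d link =>
            match dget link (dgetD tag (dgetD e d []) []) with
            | none =>
              dset e (dset tag (dset link (dgetD link (dgetD tag sv []) 0) (dgetD tag (dgetD e d []) [])) (dgetD e d [])) d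
            | some cur =>
              dset e (dset tag (dset link (cur + dgetD link (dgetD tag sv []) 0) (dgetD tag (dgetD e d []) [])) (dgetD e d [])) d
          ) d)
      (by
        intro d' a ha
        obtain ⟨w, hw⟩ := Option.isSome_iff_exists.mp ha
        have hdw : dgetD e d' ([] : List (String × List (String × Int))) = w := dgetD_eq _ hw
        simp only [hdw]
        cases hg : dget a w with
        | none => simp
        | some s2 =>
          exact foldl_path e ([] : List (String × List (String × Int)))
            (fun s1 link =>
              match dget link (dgetD a s1 []) with
              | none =>
                dset a (dset link (dgetD link (dgetD a sv []) 0) (dgetD a s1 [])) s1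
              | some cur =>
                dset a (dset link (cur + dgetD link (dgetD a sv []) 0) (dgetD a s1 [])) s1)
            (fun d link =>
              match dget link (dgetD a (dgetD e d []) []) with
              | none =>
                dset e (dset a (dset link (dgetD link (dgetD a sv []) 0) (dgetD a (dgetD e d []) [])) (dgetD e d [])) d
              | some cur =>
                dset e (dset a (dset link (cur + dgetD link (dgetD a sv []) 0) (dgetD a (dgetD e d []) [])) (dgetD e d [])) d)
            (by
              intro d'' b hb
              obtain ⟨u, hu⟩ := Option.isSome_iff_exists.mp hb
              have hdu : dgetD e d'' ([] : List (String × List (String × Int))) = u := dgetD_eq _ hu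
              simp only [hdu]
              cases hk : dget b (dgetD a u ([] : List (String × Int))) <;> simp)
            ((dgetD a sv ([] : List (String × Int))).map Prod.fst) d' w hw)
      (sv.map Prod.fst) d dv hc
    rw [hpath, level2 sv dv]
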